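-- pv_equiv track=rewrite | github.com/LibenHailu/interview-prep | practice/social_distance.py | solution
-- ===== SOURCE A (Python) =====
-- def solution(chairs,spaces):
--     spaces.sort(reverse=True)
--     needed = 0
--     for i in range(len(spaces)):
--         if i == 0:
--             needed += 2 * spaces[i] + 1
--         elif i == len(spaces) - 1:
--             needed += 1
--         else:
--             needed += spaces[i] + 1
--     return needed <= chairs
-- ===== SOURCE B (Python) =====
-- def solution(chairs, spaces):
--     n = len(spaces)
--     if n == 0:
--         return 0 <= chairs
--     if n == 1:
--         return 2 * spaces[0] + 1 <= chairs
--     return sum(spaces) + max(spaces) - min(spaces) + n <= chairs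
-- ===== Notes on version B (the rewrite author's own statement) =====
-- stated objective: faster
-- what changed: Replaced the sort-then-indexed-loop with a closed form: needed chairs equal sum(spaces) + max(spaces) - min(spaces) + len(spaces) (special-casing the empty and singleton lists), so no sort is performed.
import Mathlib
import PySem

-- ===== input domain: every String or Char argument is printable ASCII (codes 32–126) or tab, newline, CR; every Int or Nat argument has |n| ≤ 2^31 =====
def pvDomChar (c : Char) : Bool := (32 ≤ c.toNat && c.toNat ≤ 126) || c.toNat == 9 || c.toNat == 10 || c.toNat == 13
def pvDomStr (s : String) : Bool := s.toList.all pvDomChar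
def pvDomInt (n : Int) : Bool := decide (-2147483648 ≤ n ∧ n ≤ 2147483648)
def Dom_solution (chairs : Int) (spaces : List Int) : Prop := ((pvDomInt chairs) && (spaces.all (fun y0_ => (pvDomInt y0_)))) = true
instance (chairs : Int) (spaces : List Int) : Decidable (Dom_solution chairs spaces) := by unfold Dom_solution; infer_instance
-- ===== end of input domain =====

-- B replaces A's sort + indexed loop by the closed form sum + max - min + len (O(n), no sort);
-- A sorts `spaces` in place (a caller-visible mutation B does not perform): the equivalence is about the return value only.

-- ===== PORT A =====
def solution (chairs : Int) (spaces : List Int) : Bool :=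
  let t := PySem.List.sorted spaces (fun x => x) true
  let needed :=
    (PySem.List.pyRange 0 (PySem.List.len t) 1).foldl
      (fun needed i =>
        if i = 0 then needed + 2 * PySem.List.pyGetD t i 0 + 1
        else if i = PySem.List.len t - 1 then needed + 1
        else needed + PySem.List.pyGetD t i 0 + 1) 0
  decide (needed ≤ chairs)

-- ===== PORT B =====
def solution_alt (chairs : Int) (spaces : List Int) : Bool :=
  if PySem.List.len spaces = 0 then decide ((0 : Int) ≤ chairs)
  else if PySem.List.len spaces = 1 then decide (2 * PySem.List.pyGetD spaces 0 0 + 1 ≤ chairs)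
  else
    match PySem.List.max? spaces (fun x => x), PySem.List.min? spaces (fun x => x) with
    | some mx, some mn =>
        decide (spaces.sum + mx - mn + (spaces.length : Int) ≤ chairs)
    | _, _ => false

-- ===== PRECONDITION & SPEC =====
def Spec_solution (chairs : Int) (spaces : List Int) (out : Bool) : Prop := out = solution_alt chairs spaces
instance (chairs : Int) (spaces : List Int) (out : Bool) : Decidable (Spec_solution chairs spaces out) := by unfold Spec_solution; infer_instance

-- ===== CLAIM (what is proved, stated in full; the proofs are below) =====
def Claim_equal_solution : Prop := ∀ (chairs : Int) (spaces : List Int), Dom_solution chairs spaces → Spec_solution chairs spaces (solution chairs spaces)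

-- ===== LEMMAS AND PROOFS =====

-- getLast of a descending-sorted list is a lower bound for all its elements
theorem pv_getLast_le (l : List Int) (h : l.Pairwise (fun a b : Int => b ≤ a))
    (hne : l ≠ []) : ∀ y ∈ l, l.getLast hne ≤ y := by
  induction l with
  | nil => simp at hne
  | cons x xs ih =>
    intro y hy
    rcases List.pairwise_cons.mp h with ⟨hx, hxs⟩
    cases xs with
    | nil => simp at hy ⊢; omega
    | cons z zs =>
      rw [List.getLast_cons (by simp : (z :: zs) ≠ [])]
      rcases List.mem_cons.mp hy with rfl | hy'
      · exact hx _ (List.getLast_mem (by simp))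
      · exact ih hxs (by simp) y hy'

-- the loop of A, evaluated in closed form on a list of length ≥ 2
theorem pv_sum_map_succ (l : List Int) : (l.map (fun x => x + 1)).sum = l.sum + l.length := by
  induction l with
  | nil => simp
  | cons x xs ih => simp [ih]; ring

theorem pv_needed_closed (a : Int) (m : List Int) (hm : m ≠ []) :
    (PySem.List.pyRange 0 (PySem.List.len (a :: m)) 1).foldl
      (fun needed i =>
        if i = 0 then needed + 2 * PySem.List.pyGetD (a :: m) i 0 + 1
        else if i = PySem.List.len (a :: m) - 1 then needed + 1
        else needed + PySem.List.pyGetD (a :: m) i 0 + 1) 0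
    = (a :: m).sum + a - m.getLast hm + (((a :: m).length : Int)) := by
  have hlm : 1 ≤ m.length := List.length_pos_iff.mpr hm
  have hlv : PySem.List.len (a :: m) = (m.length : Int) + 1 := by
    simp [PySem.List.len_eq]
  have hN : (2:Int) ≤ PySem.List.len (a :: m) := by omega
  have hsplit : ∀ N : Int, 2 ≤ N →
      PySem.List.pyRange 1 N 1 = PySem.List.pyRange 1 (N-1) 1 ++ [N-1] := by
    intro N hN2
    have h : N = (N-1)+1 := by omega
    rw [h, PySem.List.pyRange_one_succ_right (by omega)]
    norm_num
  -- the middle indices contribute sum(m.dropLast) + (len(m) - 1)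
  have hmid : ∀ acc : Int,
      (PySem.List.pyRange 1 (PySem.List.len (a :: m) - 1) 1).foldl
        (fun needed i =>
          if i = 0 then needed + 2 * PySem.List.pyGetD (a :: m) i 0 + 1
          else if i = PySem.List.len (a :: m) - 1 then needed + 1
          else needed + PySem.List.pyGetD (a :: m) i 0 + 1) acc
      = acc + (m.dropLast.sum + ((m.length : Int) - 1)) := by
    intro acc
    have hstep : ∀ (acc : Int), ∀ i ∈ PySem.List.pyRange 1 (PySem.List.len (a :: m) - 1) 1,
        (if i = 0 then acc + 2 * PySem.List.pyGetD (a :: m) i 0 + 1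
         else if i = PySem.List.len (a :: m) - 1 then acc + 1
         else acc + PySem.List.pyGetD (a :: m) i 0 + 1)
        = acc + (PySem.List.pyGetD ((a :: m).dropLast) i 0 + 1) := by
      intro acc i hi
      have hb := PySem.List.mem_pyRange_one.mp hi
      rw [hlv] at hb
      rw [if_neg (by omega : ¬ (i = 0)),
          if_neg (by rw [hlv]; omega : ¬ (i = PySem.List.len (a :: m) - 1))]
      have e1 := PySem.List.pyGetD_eq_getElem (a :: m) (i := i) 0 (by omega)
        (by simp only [List.length_cons]; push_cast; omega)
      have e2 := PySem.List.pyGetD_eq_getElem ((a :: m).dropLast) (i := i) 0 (by omega)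
        (by simp only [List.length_dropLast, List.length_cons]; push_cast; omega)
      rw [e1, e2, List.getElem_dropLast]
      ring
    rw [PySem.List.foldl_congr_mem _ _ _ _ hstep, PySem.List.foldl_add]
    have hb : PySem.List.len (a :: m) - 1 = (((a :: m).dropLast).length : Int) := by
      rw [hlv]; simp [List.length_dropLast]
    rw [hb, show (fun i => PySem.List.pyGetD ((a :: m).dropLast) i 0 + 1) = ((fun x => x + 1) ∘ (fun i => PySem.List.pyGetD ((a :: m).dropLast) i 0)) from rfl,
        ← List.map_map, PySem.List.map_pyGetD_pyRange' ((a :: m).dropLast) 0 (by omega)]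
    have hdrop : ((a :: m).dropLast).drop (1 : Int).toNat = m.dropLast := by
      cases m with
      | nil => simp at hm
      | cons z zs => simp [List.dropLast_cons₂]
    rw [hdrop, pv_sum_map_succ]
    have hdll : (m.dropLast.length : Int) = (m.length : Int) - 1 := by
      simp [List.length_dropLast]; omega
    omega
  rw [PySem.List.pyRange_one_cons (by omega), List.foldl_cons]
  simp only [zero_add]
  rw [hsplit _ hN, List.foldl_append]
  simp only [if_true, PySem.List.pyGetD_zero_cons]
  rw [hmid, List.foldl_cons, List.foldl_nil]
  rw [if_neg (by rw [hlv]; omega : ¬ (PySem.List.len (a :: m) - 1 = 0)), if_pos rfl]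
  have hdl : m.dropLast.sum + m.getLast hm = m.sum := by
    conv_rhs => rw [← List.dropLast_append_getLast hm]
    simp
  simp only [List.sum_cons, List.length_cons]
  push_cast
  omega

theorem solution_spec : Claim_equal_solution := by
  intro chairs spaces _
  unfold Spec_solution solution solution_alt
  obtain ⟨t, ht⟩ : ∃ l, PySem.List.sorted spaces (fun x => x) true = l := ⟨_, rfl⟩
  have hperm : t.Perm spaces := ht ▸ PySem.List.sorted_perm spaces (fun x => x) true
  have hpw : t.Pairwise (fun a b : Int => b ≤ a) :=
    ht ▸ PySem.List.sorted_pairwise_rev spaces (fun x => x)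
  simp only [ht]
  cases t with
  | nil =>
    have hsp : spaces = [] := hperm.symm.eq_nil
    subst hsp
    simp [PySem.List.pyRange, PySem.List.len]
  | cons a m =>
    cases m with
    | nil =>
      have hsp : spaces = [a] := List.perm_singleton.mp hperm.symm
      subst hsp
      simp [PySem.List.pyRange, PySem.List.len, PySem.List.pyGetD]
    | cons z zs =>
      have hm : (z :: zs) ≠ [] := by simp
      rw [pv_needed_closed a (z :: zs) hm]
      have hlen : (a :: z :: zs).length = spaces.length := hperm.length_eq
      have hsum : (a :: z :: zs).sum = spaces.sum := hperm.sum_eq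
      have hlsp : 2 ≤ spaces.length := by simp at hlen; omega
      have h0 : ¬ (PySem.List.len spaces = 0) := by
        simp only [PySem.List.len_eq]; intro h; omega
      have h1 : ¬ (PySem.List.len spaces = 1) := by
        simp only [PySem.List.len_eq]; intro h; omega
      rw [if_neg h0, if_neg h1]
      have hspne : spaces ≠ [] := by intro h; subst h; simp at hlsp
      obtain ⟨mx, hmx⟩ := Option.ne_none_iff_exists'.mp
        (fun h => hspne ((PySem.List.max?_eq_none_iff spaces (fun x : Int => x)).mp h))
      obtain ⟨mn, hmn⟩ := Option.ne_none_iff_exists'.mp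
        (fun h => hspne ((PySem.List.min?_eq_none_iff spaces (fun x : Int => x)).mp h))
      rw [hmx, hmn]
      have hmax : mx = a := by
        have hub : ∀ y ∈ spaces, y ≤ a :=
          PySem.List.key_head_sorted_rev_ge spaces (fun x => x) (m := a) (t := z :: zs) ht
        have h2 : ∀ y ∈ spaces, y ≤ mx := PySem.List.max?_isMax hmx
        exact le_antisymm (hub mx (PySem.List.max?_mem hmx))
          (h2 a (hperm.mem_iff.mp (by simp)))
      have hmin : mn = (z :: zs).getLast hm := by
        have hgl : ∀ y ∈ (a :: z :: zs), (a :: z :: zs).getLast (by simp) ≤ y :=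
          pv_getLast_le _ hpw (by simp)
        have hgl2 : (a :: z :: zs).getLast (by simp) = (z :: zs).getLast hm :=
          List.getLast_cons hm
        have h2 : ∀ y ∈ spaces, mn ≤ y := PySem.List.min?_isMin hmn
        have hlmem : (z :: zs).getLast hm ∈ spaces :=
          hperm.mem_iff.mp (List.mem_cons_of_mem _ (List.getLast_mem hm))
        refine le_antisymm (h2 _ hlmem) ?_
        rw [← hgl2]
        exact hgl mn (hperm.mem_iff.mpr (PySem.List.min?_mem hmn))
      subst hmax hmin
      rw [← hlen, ← hsum]
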